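-- pv_equiv track=rewrite | github.com/sselvakumaran/advent-of-code | aoc/day4.py | part2
-- ===== SOURCE A (Python) =====
-- def part2(data: str):
-- 	lines = data.splitlines()
-- 	M = len(lines)
-- 	N = len(lines[0])
-- 	DIRECTIONS = [(-1, -1), (-1, 0), (-1, 1), (0, -1), (0, 1), (1, -1), (1, 0), (1, 1)]
-- 	IS_VALID = lambda x, y: x >= 0 and x < M and y >= 0 and y < N
--
-- 	A = [[0 for _ in range(N)] for _ in range(M)]
-- 	for i, line in enumerate(lines):
-- 		for j, c in enumerate(line):
-- 			A[i][j] = 1 if c == "@" else 0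
--
-- 	out = 0
-- 	to_update = [1]
-- 	while to_update:
-- 		to_update = []
-- 		for i in range(M):
-- 			for j in range(N):
-- 				if A[i][j] == 0:
-- 					continue
-- 				local_count = 0
-- 				for dx, dy in DIRECTIONS:
-- 					x, y = i + dx, j + dy
-- 					if not IS_VALID(x, y): continue
-- 					if A[x][y] == 1:
-- 						local_count += 1
-- 				if local_count < 4:
-- 					to_update.append((i, j))
--
-- 		out += len(to_update)
-- 		for i, j in to_update:
-- 			A[i][j] = 0
-- 	return out
-- ===== SOURCE B (Python) =====
-- def part2(data: str):
--     lines = data.splitlines()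
--     live = set()
--     stack = []
--     for i, line in enumerate(lines):
--         for j, c in enumerate(line):
--             if c == "@":
--                 live.add((i, j))
--                 stack.append((i, j))
--     total = len(stack)
--     while stack:
--         (i, j) = stack.pop()
--         if (i, j) not in live:
--             continue
--         nbrs = [(i - 1, j - 1), (i - 1, j), (i - 1, j + 1), (i, j - 1),
--                 (i, j + 1), (i + 1, j - 1), (i + 1, j), (i + 1, j + 1)]
--         count = 0
--         for q in nbrs:
--             if q in live:
--                 count += 1
--         if count < 4:
--             live.discard((i, j))
--             for q in nbrs:
--                 if q in live:
--                     stack.append(q)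
--     return total - len(live)
-- ===== Notes on version B (the rewrite author's own statement) =====
-- stated objective: faster
-- what changed: A repeatedly rescans the whole grid, recomputing every live cell's neighbour count each round until a round removes nothing; B makes one scan to build the live set and a worklist, then re-examines a cell only when it is popped from the worklist, pushing the neighbours of each removed cell, and returns initial live count minus survivors.
import Mathlib
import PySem

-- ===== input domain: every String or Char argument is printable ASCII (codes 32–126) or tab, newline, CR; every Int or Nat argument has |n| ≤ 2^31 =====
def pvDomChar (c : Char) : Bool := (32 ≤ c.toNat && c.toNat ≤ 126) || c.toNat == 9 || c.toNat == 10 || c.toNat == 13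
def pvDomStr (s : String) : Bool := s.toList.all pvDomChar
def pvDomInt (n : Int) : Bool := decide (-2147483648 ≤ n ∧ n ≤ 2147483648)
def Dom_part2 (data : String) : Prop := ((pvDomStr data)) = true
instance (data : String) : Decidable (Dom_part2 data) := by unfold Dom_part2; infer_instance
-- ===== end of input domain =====

-- B replaces A's repeated full-grid peeling rounds with a worklist: cells are re-examined
-- only when a neighbour is removed, giving one pass plus constant work per removal (objective: faster).

-- ===== PORT A =====
def pvDirs : List (Int × Int) := [(-1,-1),(-1,0),(-1,1),(0,-1),(0,1),(1,-1),(1,0),(1,1)]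

-- A[i][j] / A[i][j] = v on the list-of-lists grid (defaulted; Pre_ keeps all accesses in range)
def pvGet2 (A : List (List Int)) (i j : Int) : Int :=
  PySem.List.pyGetD (PySem.List.pyGetD A i []) j 0

def pvSet2 (A : List (List Int)) (i j : Int) (v : Int) : List (List Int) :=
  PySem.List.pySetD A i (PySem.List.pySetD (PySem.List.pyGetD A i []) j v)

def pvInitA (lines : List String) (M N : Int) : List (List Int) :=
  (PySem.List.enumerate lines 0).foldl (fun A il =>
    (PySem.List.enumerate il.2.toList 0).foldl (fun A jc =>
      pvSet2 A il.1 jc.1 (if jc.2 = '@' then 1 else 0)) A)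
    ((PySem.List.pyRange 0 M 1).map fun _ => (PySem.List.pyRange 0 N 1).map fun _ => (0:Int))

-- one scan of the grid collecting all live cells with fewer than 4 live neighbours
def pvRound (M N : Int) (A : List (List Int)) : List (Int × Int) :=
  (PySem.List.pyRange 0 M 1).foldl (fun acc i =>
    (PySem.List.pyRange 0 N 1).foldl (fun acc j =>
      if pvGet2 A i j = 0 then acc
      else
        let cnt : Int := pvDirs.foldl (fun c d =>
          let x := i + d.1
          let y := j + d.2
          if ¬(x ≥ 0 ∧ x < M ∧ y ≥ 0 ∧ y < N) then c
          else if pvGet2 A x y = 1 then c + 1 else c) 0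
        if cnt < 4 then acc ++ [(i, j)] else acc) acc) []

-- the while loop; fuel only makes the recursion structural (one unit per executed iteration,
-- (M*N).toNat+1 is proved sufficient in the lemmas below)
def pvLoopA (fuel : Nat) (M N : Int) (A : List (List Int)) (out : Int) : Int :=
  match fuel with
  | 0 => out
  | Nat.succ f =>
      let upd := pvRound M N A
      let out' := out + upd.length
      let A' := upd.foldl (fun g p => pvSet2 g p.1 p.2 0) A
      if upd = [] then out' else pvLoopA f M N A' out'

def part2 (data : String) : Int :=
  let lines := PySem.Str.splitlines data
  let M : Int := lines.length
  let N : Int := PySem.Str.len (PySem.List.pyGetD lines 0 "")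
  pvLoopA ((M * N).toNat + 1) M N (pvInitA lines M N) 0

-- ===== PORT B =====
def pvNbrs (i j : Int) : List (Int × Int) :=
  [(i-1,j-1),(i-1,j),(i-1,j+1),(i,j-1),(i,j+1),(i+1,j-1),(i+1,j),(i+1,j+1)]

-- first loop of B: build the live set and the initial worklist
def pvInitB (lines : List String) : PySem.Set (Int × Int) × List (Int × Int) :=
  (PySem.List.enumerate lines 0).foldl (fun st il =>
    (PySem.List.enumerate il.2.toList 0).foldl (fun st jc =>
      if jc.2 = '@' then (PySem.Set.add st.1 (il.1, jc.1), st.2 ++ [(il.1, jc.1)]) else st) st)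
    (PySem.Set.empty, [])

-- the worklist loop; fuel only makes the recursion structural (one unit per executed
-- iteration, stack.length + 8*live.length + 1 is proved sufficient in the lemmas below)
def pvLoopB (fuel : Nat) (live : PySem.Set (Int × Int)) (stack : List (Int × Int)) :
    PySem.Set (Int × Int) :=
  match fuel with
  | 0 => live
  | Nat.succ f =>
    if hs : stack = [] then live
    else
      let p := stack.getLast hs
      let stack' := stack.dropLast
      if PySem.Set.contains live p = false then pvLoopB f live stack'
      else
        let nbrs := pvNbrs p.1 p.2
        let count : Int := nbrs.foldl (fun c q => if PySem.Set.contains live q then c + 1 else c) 0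
        if count < 4 then
          let live' := PySem.Set.discard live p
          pvLoopB f live' (stack' ++ nbrs.filter (fun q => PySem.Set.contains live' q))
        else pvLoopB f live stack'

def part2_alt (data : String) : Int :=
  let lines := PySem.Str.splitlines data
  let st := pvInitB lines
  let total : Int := st.2.length
  total - PySem.Set.len (pvLoopB (st.2.length + 8 * st.1.length + 1) st.1 st.2)

-- ===== PRECONDITION & SPEC =====
-- Pre_ excludes exactly the inputs on which A raises IndexError: an empty input (lines[0])
-- and ragged input where some later line is longer than the first (A[i][j] out of range).
def Pre_part2 (data : String) : Prop :=
  PySem.Str.splitlines data ≠ [] ∧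
  ∀ l ∈ PySem.Str.splitlines data,
    PySem.Str.len l ≤ PySem.Str.len ((PySem.Str.splitlines data).headD "")
instance (data : String) : Decidable (Pre_part2 data) := by unfold Pre_part2; infer_instance

def pvWitness_part2 : String := "@@.\n@@@"

def Spec_part2 (data : String) (out : Int) : Prop := out = part2_alt data
instance (data : String) (out : Int) : Decidable (Spec_part2 data out) := by unfold Spec_part2; infer_instance

-- ===== CLAIM (what is proved, stated in full; the proofs are below) =====
def Claim_equal_part2 : Prop := ∀ (data : String), Dom_part2 data → Pre_part2 data → Spec_part2 data (part2 data)

-- ===== LEMMAS AND PROOFS =====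

-- ---------- generic utilities ----------
theorem pv_length_pySetD {α : Type} (xs : List α) (i : Int) (v : α) :
    (PySem.List.pySetD xs i v).length = xs.length := by
  simp only [PySem.List.pySetD, PySem.List.pySet?]
  cases h : PySem.List.pyIdx? xs.length i <;> simp

theorem pv_pySetD_natCast {α : Type} (xs : List α) (n : Nat) (v : α) (h : n < xs.length) :
    PySem.List.pySetD xs (n : Int) v = xs.set n v := by
  simp [PySem.List.pySetD, PySem.List.pySet?, PySem.List.pyIdx?, h]

theorem pv_nodup_flatMap {α : Type} (l : List α) (f : α → List (Int × Int))
    (h1 : ∀ a ∈ l, (f a).Nodup)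
    (h2 : l.Pairwise (fun a b => ∀ x ∈ f a, ∀ y ∈ f b, x ≠ y)) :
    (l.flatMap f).Nodup := by
  induction l with
  | nil => simp
  | cons a t ih =>
    rw [List.flatMap_cons]
    rw [List.nodup_append]
    refine ⟨h1 a (by simp), ih (fun b hb => h1 b (by simp [hb])) (List.pairwise_cons.1 h2).2, ?_⟩
    intro x hx y hy
    rw [List.mem_flatMap] at hy
    obtain ⟨b, hb, hyb⟩ := hy
    exact (List.pairwise_cons.1 h2).1 b hb x hx y hyb

theorem pv_mem_dropLast {α : Type} {l : List α} {a : α} (hne : l ≠ [])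
    (h : a ∈ l) (hlast : a ≠ l.getLast hne) : a ∈ l.dropLast := by
  have hsplit : l.dropLast ++ [l.getLast hne] = l := List.dropLast_append_getLast hne
  rw [← hsplit] at h
  rcases List.mem_append.1 h with h' | h'
  · exact h'
  · simp at h'; exact absurd h' hlast

-- ---------- neighbourhood, degree, 4-core ----------
theorem pvNbrs_mem_iff (i j : Int) (q : Int × Int) :
    q ∈ pvNbrs i j ↔ (i - 1 ≤ q.1 ∧ q.1 ≤ i + 1 ∧ j - 1 ≤ q.2 ∧ q.2 ≤ j + 1 ∧ ¬(q.1 = i ∧ q.2 = j)) := by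
  rcases q with ⟨a, b⟩
  simp [pvNbrs, Prod.ext_iff]
  omega

theorem pvNbrs_symm {p q : Int × Int} : p ∈ pvNbrs q.1 q.2 ↔ q ∈ pvNbrs p.1 p.2 := by
  simp only [pvNbrs_mem_iff]
  omega

def pvDeg (L : Finset (Int × Int)) (p : Int × Int) : Nat :=
  (pvNbrs p.1 p.2).countP (fun q => decide (q ∈ L))

theorem pvDeg_mono {L L' : Finset (Int × Int)} (h : L ⊆ L') (p : Int × Int) :
    pvDeg L p ≤ pvDeg L' p :=
  List.countP_mono_left (fun q _ hq => by simp_all; exact h hq)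

theorem pvDeg_erase_of_not_nbr {L : Finset (Int × Int)} {p q : Int × Int}
    (h : p ∉ pvNbrs q.1 q.2) : pvDeg (L.erase p) q = pvDeg L q := by
  unfold pvDeg
  refine List.countP_congr (fun a ha => ?_)
  have hap : a ≠ p := fun he => h (he ▸ ha)
  simp [Finset.mem_erase, hap]

def pvGoodP (L : Finset (Int × Int)) : Prop := ∀ p ∈ L, 4 ≤ pvDeg L p

def pvCore (S : Finset (Int × Int)) : Finset (Int × Int) :=
  (S.powerset.filter (fun T => ∀ p ∈ T, 4 ≤ pvDeg T p)).sup id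

theorem pvCore_subset (S : Finset (Int × Int)) : pvCore S ⊆ S := by
  show pvCore S ≤ S
  unfold pvCore
  exact Finset.sup_le (fun T hT => Finset.mem_powerset.1 (Finset.mem_filter.1 hT).1)

theorem pv_subset_core {S T : Finset (Int × Int)} (h1 : T ⊆ S) (h2 : pvGoodP T) :
    T ⊆ pvCore S := by
  have hmem : T ∈ S.powerset.filter (fun T => ∀ p ∈ T, 4 ≤ pvDeg T p) :=
    Finset.mem_filter.2 ⟨Finset.mem_powerset.2 h1, h2⟩
  show T ≤ pvCore S
  unfold pvCore
  exact Finset.le_sup (f := id) hmem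

theorem pvGood_union {L L' : Finset (Int × Int)} (h : pvGoodP L) (h' : pvGoodP L') :
    pvGoodP (L ⊔ L') := by
  intro p hp
  rcases Finset.mem_union.1 hp with hp' | hp'
  · exact le_trans (h p hp') (pvDeg_mono Finset.subset_union_left p)
  · exact le_trans (h' p hp') (pvDeg_mono Finset.subset_union_right p)

theorem pvGood_core (S : Finset (Int × Int)) : pvGoodP (pvCore S) := by
  have h := Finset.sup_induction
    (s := S.powerset.filter (fun T => ∀ p ∈ T, 4 ≤ pvDeg T p)) (f := id) (p := pvGoodP)
    (fun p hp => absurd hp (by simp)) (fun a ha b hb => pvGood_union ha hb)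
    (fun T hT => (Finset.mem_filter.1 hT).2)
  exact h

theorem pv_core_eq {S L : Finset (Int × Int)} (h1 : pvCore S ⊆ L) (h2 : L ⊆ S)
    (h3 : pvGoodP L) : L = pvCore S :=
  subset_antisymm (pv_subset_core h2 h3) h1

theorem pv_core_subset_erase {S L : Finset (Int × Int)} {p : Int × Int}
    (hc : pvCore S ⊆ L) (hdef : pvDeg L p < 4) : pvCore S ⊆ L.erase p := by
  intro q hq
  have hqL : q ∈ L := hc hq
  refine Finset.mem_erase.2 ⟨?_, hqL⟩
  rintro rfl
  have h4 : 4 ≤ pvDeg (pvCore S) q := pvGood_core S q hq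
  exact absurd (le_trans h4 (pvDeg_mono hc q)) (by omega)

theorem pv_core_subset_sdiff {S L R : Finset (Int × Int)}
    (hc : pvCore S ⊆ L) (hR : ∀ p ∈ R, pvDeg L p < 4) : pvCore S ⊆ L \ R := by
  intro q hq
  have hqL : q ∈ L := hc hq
  refine Finset.mem_sdiff.2 ⟨hqL, fun hqR => ?_⟩
  have h4 : 4 ≤ pvDeg (pvCore S) q := pvGood_core S q hq
  exact absurd (le_trans h4 (pvDeg_mono hc q)) (by have := hR q hqR; omega)

-- ---------- the cells of the input ----------
def pvRowCells (i : Int) (cs : List Char) (m : Int) : List (Int × Int) :=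
  (PySem.List.enumerate cs m).filterMap (fun jc => if jc.2 = '@' then some (i, jc.1) else none)

def pvCells (lines : List String) : List (Int × Int) :=
  (PySem.List.enumerate lines 0).flatMap (fun il => pvRowCells il.1 il.2.toList 0)

theorem pv_rowCells_fst {i : Int} {cs : List Char} {m : Int} {x : Int × Int}
    (h : x ∈ pvRowCells i cs m) : x.1 = i := by
  unfold pvRowCells at h
  rw [List.mem_filterMap] at h
  obtain ⟨jc, _, hjc⟩ := h
  by_cases hc : jc.2 = '@' <;> simp [hc] at hjc
  exact (congrArg Prod.fst hjc.symm)

theorem pv_rowCells_nodup (i : Int) (cs : List Char) (m : Int) : (pvRowCells i cs m).Nodup := by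
  unfold pvRowCells
  have hp : (PySem.List.enumerate cs m).Pairwise (fun p q => p.1 < q.1) :=
    PySem.List.pairwise_lt_enumerate cs m
  have : ((PySem.List.enumerate cs m).filterMap
      (fun jc => if jc.2 = '@' then some (i, jc.1) else none)).Pairwise (fun a b => a.2 < b.2) := by
    refine List.Pairwise.filterMap _ (fun a b hab => ?_) hp
    intro x hx y hy
    by_cases ha : a.2 = '@' <;> simp [ha] at hx
    by_cases hb : b.2 = '@' <;> simp [hb] at hy
    subst hx; subst hy; simpa using hab
  exact this.imp (fun h => by intro he; rw [he] at h; omega)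

theorem pv_cells_nodup (lines : List String) : (pvCells lines).Nodup := by
  unfold pvCells
  refine pv_nodup_flatMap _ _ (fun a _ => pv_rowCells_nodup _ _ _) ?_
  have hp : (PySem.List.enumerate lines 0).Pairwise (fun p q => p.1 < q.1) :=
    PySem.List.pairwise_lt_enumerate lines 0
  refine hp.imp ?_
  intro a b hab x hx y hy he
  have hxa := pv_rowCells_fst hx
  have hyb := pv_rowCells_fst hy
  rw [he] at hxa; rw [hxa] at hyb; omega

theorem pv_mem_rowCells {i : Int} {cs : List Char} {p : Int × Int} :
    p ∈ pvRowCells i cs 0 ↔ ∃ (m : Nat) (hm : m < cs.length), p = (i, (m : Int)) ∧ cs[m] = '@' := by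
  unfold pvRowCells
  rw [List.mem_filterMap]
  constructor
  · rintro ⟨jc, hjc, hp⟩
    rw [PySem.List.mem_enumerate_iff] at hjc
    obtain ⟨m, hm, rfl⟩ := hjc
    by_cases hc : cs[m] = '@' <;> simp [hc] at hp
    exact ⟨m, hm, by simpa using hp.symm, hc⟩
  · rintro ⟨m, hm, rfl, hc⟩
    refine ⟨((m : Int), cs[m]), ?_, by simp [hc]⟩
    rw [PySem.List.mem_enumerate_iff]
    exact ⟨m, hm, by simp⟩

theorem pv_mem_cells {lines : List String} {p : Int × Int} :
    p ∈ pvCells lines ↔ ∃ (k : Nat) (hk : k < lines.length) (m : Nat)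
      (hm : m < lines[k].toList.length),
      p = ((k : Int), (m : Int)) ∧ lines[k].toList[m] = '@' := by
  unfold pvCells
  rw [List.mem_flatMap]
  constructor
  · rintro ⟨il, hil, hp⟩
    rw [PySem.List.mem_enumerate_iff] at hil
    obtain ⟨k, hk, rfl⟩ := hil
    rw [pv_mem_rowCells] at hp
    obtain ⟨m, hm, rfl, hc⟩ := hp
    exact ⟨k, hk, m, by simpa using hm, by simp, by simpa using hc⟩
  · rintro ⟨k, hk, m, hm, rfl, hc⟩
    refine ⟨((k : Int), lines[k]), ?_, ?_⟩
    · rw [PySem.List.mem_enumerate_iff]; exact ⟨k, hk, by simp⟩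
    · rw [pv_mem_rowCells]; exact ⟨m, hm, by simp, hc⟩

-- ---------- port B: the init loop builds (set of cells, list of cells) ----------
theorem pv_initB_inner (i : Int) (cs : List Char) :
    ∀ (m : Int) (s : PySem.Set (Int × Int)) (t : List (Int × Int)),
    (PySem.List.enumerate cs m).foldl (fun st jc =>
        if jc.2 = '@' then (PySem.Set.add st.1 (i, jc.1), st.2 ++ [(i, jc.1)]) else st) (s, t)
      = (PySem.Set.update s (pvRowCells i cs m), t ++ pvRowCells i cs m) := by
  induction cs with
  | nil => intro m s t; simp [pvRowCells, PySem.List.enumerate_nil, PySem.Set.update_nil]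
  | cons c cs ih =>
    intro m s t
    rw [PySem.List.enumerate_cons]
    by_cases hc : c = '@'
    · simp only [List.foldl_cons, hc, if_pos rfl]
      rw [ih]
      simp [pvRowCells, PySem.List.enumerate_cons, hc, PySem.Set.update_cons]
    · simp only [List.foldl_cons, if_neg (by simpa using hc)]
      rw [ih]
      simp [pvRowCells, PySem.List.enumerate_cons, hc]

theorem pv_initB_outer (lines : List String) :
    ∀ (k : Int) (s : PySem.Set (Int × Int)) (t : List (Int × Int)),
    (PySem.List.enumerate lines k).foldl (fun st il =>
        (PySem.List.enumerate il.2.toList 0).foldl (fun st jc =>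
          if jc.2 = '@' then (PySem.Set.add st.1 (il.1, jc.1), st.2 ++ [(il.1, jc.1)]) else st) st)
      (s, t)
      = (PySem.Set.update s ((PySem.List.enumerate lines k).flatMap (fun il => pvRowCells il.1 il.2.toList 0)),
         t ++ (PySem.List.enumerate lines k).flatMap (fun il => pvRowCells il.1 il.2.toList 0)) := by
  induction lines with
  | nil => intro k s t; simp [PySem.List.enumerate_nil, PySem.Set.update_nil]
  | cons l ls ih =>
    intro k s t
    rw [PySem.List.enumerate_cons]
    simp only [List.foldl_cons, List.flatMap_cons]
    rw [pv_initB_inner, ih]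
    rw [PySem.Set.update_append, List.append_assoc]

theorem pv_initB_eq (lines : List String) :
    pvInitB lines = (pvCells lines, pvCells lines) := by
  unfold pvInitB pvCells
  rw [pv_initB_outer]
  have h1 : PySem.Set.update PySem.Set.empty
      ((PySem.List.enumerate lines 0).flatMap (fun il => pvRowCells il.1 il.2.toList 0))
      = PySem.Set.ofList ((PySem.List.enumerate lines 0).flatMap (fun il => pvRowCells il.1 il.2.toList 0)) := rfl
  rw [h1, PySem.Set.ofList_eq_self_of_nodup _ (by
    have := pv_cells_nodup lines
    unfold pvCells at this
    exact this)]
  simp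

-- ---------- port B: the worklist loop reaches exactly the 4-core ----------
theorem pv_contains_eq (live : PySem.Set (Int × Int)) (q : Int × Int) :
    PySem.Set.contains live q = decide (q ∈ live.toFinset) := by
  rw [Bool.eq_iff_iff]
  simp [PySem.Set.contains_iff]

theorem pv_count_eq_deg (live : PySem.Set (Int × Int)) (p : Int × Int) :
    (pvNbrs p.1 p.2).foldl (fun c q => if PySem.Set.contains live q then c + 1 else c) (0 : Int)
      = (pvDeg live.toFinset p : Int) := by
  have h : ∀ (c : Int), ∀ q ∈ pvNbrs p.1 p.2,
      (if PySem.Set.contains live q then c + 1 else c)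
        = (if (q ∈ live.toFinset) then c + 1 else c) := by
    intro c q _
    rw [pv_contains_eq]
    by_cases hq : q ∈ live.toFinset <;> simp [hq]
  rw [PySem.List.foldl_congr_mem _ _ _ _ h]
  rw [PySem.List.foldl_ite_add_one (fun q => q ∈ live.toFinset)]
  simp [pvDeg]

theorem pv_discard_toFinset (live : PySem.Set (Int × Int)) (p : Int × Int) :
    (PySem.Set.discard live p).toFinset = live.toFinset.erase p := by
  show (live.filter (fun y => !y == p)).toFinset = _
  rw [List.toFinset_filter]
  rw [← Finset.filter_ne' live.toFinset p]
  refine Finset.filter_congr (fun x _ => ?_)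
  simp

theorem pv_filter_ne_length : ∀ (l : List (Int × Int)) (p : Int × Int), l.Nodup → p ∈ l →
    (l.filter (fun y => !(y == p))).length + 1 = l.length := by
  intro l p
  induction l with
  | nil => intro _ hp; cases hp
  | cons x t ih =>
    intro hnd hp
    rcases List.mem_cons.1 hp with rfl | hpt
    · rw [List.filter_cons_of_neg (by simp)]
      rw [List.filter_eq_self.2 (fun y hy => by
        simp only [bne_iff_ne, ne_eq, Bool.not_eq_eq_eq_not, Bool.not_true, beq_eq_false_iff_ne]
        intro he
        exact (List.nodup_cons.1 hnd).1 (he ▸ hy))]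
      simp
    · have hxp : (x == p) = false := by
        simp only [beq_eq_false_iff_ne]
        rintro rfl
        exact (List.nodup_cons.1 hnd).1 hpt
      rw [List.filter_cons_of_pos (by simp [hxp])]
      simp only [List.length_cons]
      rw [← ih (List.nodup_cons.1 hnd).2 hpt]

theorem pvLoopB_spec (S : Finset (Int × Int)) :
    ∀ (fuel : Nat) (live : PySem.Set (Int × Int)) (stack : List (Int × Int)),
    live.Nodup →
    live.toFinset ⊆ S →
    pvCore S ⊆ live.toFinset →
    (∀ q ∈ live, pvDeg live.toFinset q < 4 → q ∈ stack) →
    stack.length + 8 * live.length < fuel →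
    (pvLoopB fuel live stack).length = (pvCore S).card := by
  intro fuel
  induction fuel with
  | zero => intro live stack _ _ _ _ h; omega
  | succ f ih =>
    intro live stack hnd hsub hcore hcomp hfuel
    simp only [pvLoopB]
    by_cases hs : stack = []
    · rw [dif_pos hs]
      have hgood : pvGoodP live.toFinset := by
        intro q hq
        have hql : q ∈ live := List.mem_toFinset.1 hq
        by_contra h4
        have := hcomp q hql (by omega)
        rw [hs] at this
        simp at this
      rw [← pv_core_eq hcore hsub hgood]
      exact (List.toFinset_card_of_nodup hnd).symm
    · rw [dif_neg hs]
      have hstlen : stack.dropLast.length + 1 = stack.length := by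
        have := List.length_pos_iff.2 hs
        simp only [List.length_dropLast]
        omega
      by_cases hp : PySem.Set.contains live (stack.getLast hs) = false
      · rw [if_pos hp]
        refine ih live stack.dropLast hnd hsub hcore ?_ (by omega)
        intro q hq hdq
        have hqp : q ≠ stack.getLast hs := by
          intro he
          have hct : PySem.Set.contains live (stack.getLast hs) = true :=
            (PySem.Set.contains_iff live _).mpr (he ▸ hq)
          rw [hp] at hct
          cases hct
        exact pv_mem_dropLast hs (hcomp q hq hdq) hqp
      · rw [if_neg hp]
        have hpl : stack.getLast hs ∈ live := (PySem.Set.contains_iff live _).mp (by simpa using hp)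
        by_cases hcnt : (pvNbrs (stack.getLast hs).1 (stack.getLast hs).2).foldl
            (fun c q => if PySem.Set.contains live q then c + 1 else c) (0 : Int) < 4
        · rw [if_pos hcnt]
          have hdegp : pvDeg live.toFinset (stack.getLast hs) < 4 := by
            rw [pv_count_eq_deg live (stack.getLast hs)] at hcnt
            exact_mod_cast hcnt
          have hfin : (PySem.Set.discard live (stack.getLast hs)).toFinset
              = live.toFinset.erase (stack.getLast hs) := pv_discard_toFinset live _
          have hll : (PySem.Set.discard live (stack.getLast hs)).length + 1 = live.length :=
            pv_filter_ne_length live _ hnd hpl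
          have hfl : ((pvNbrs (stack.getLast hs).1 (stack.getLast hs).2).filter
              (fun q => PySem.Set.contains (PySem.Set.discard live (stack.getLast hs)) q)).length ≤ 8 := by
            have := List.length_filter_le
              (fun q => PySem.Set.contains (PySem.Set.discard live (stack.getLast hs)) q)
              (pvNbrs (stack.getLast hs).1 (stack.getLast hs).2)
            simpa [pvNbrs] using this
          refine ih _ _ (List.Nodup.filter _ hnd) ?_ ?_ ?_ ?_
          · rw [hfin]
            exact fun x hx => hsub (Finset.mem_of_mem_erase hx)
          · rw [hfin]
            exact pv_core_subset_erase hcore hdegp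
          · intro q hq hdq
            rw [List.mem_append]
            have hql : q ∈ live := ((PySem.Set.mem_discard live _ q).1 hq).1
            have hqp : q ≠ stack.getLast hs := ((PySem.Set.mem_discard live _ q).1 hq).2
            by_cases hold : pvDeg live.toFinset q < 4
            · left
              exact pv_mem_dropLast hs (hcomp q hql hold) hqp
            · right
              rw [hfin] at hdq
              have hpn : stack.getLast hs ∈ pvNbrs q.1 q.2 := by
                by_contra hpn
                rw [pvDeg_erase_of_not_nbr hpn] at hdq
                omega
              rw [List.mem_filter]
              refine ⟨pvNbrs_symm.1 hpn, ?_⟩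
              rw [pv_contains_eq]
              simp only [decide_eq_true_eq]
              exact List.mem_toFinset.2 hq
          · rw [List.length_append]
            omega
        · rw [if_neg hcnt]
          have hdp : ¬ pvDeg live.toFinset (stack.getLast hs) < 4 := by
            rw [pv_count_eq_deg live (stack.getLast hs)] at hcnt
            intro h4
            exact hcnt (by exact_mod_cast h4)
          refine ih live stack.dropLast hnd hsub hcore ?_ (by omega)
          intro q hq hdq
          have hqp : q ≠ stack.getLast hs := by
            intro he
            exact hdp (he ▸ hdq)
          exact pv_mem_dropLast hs (hcomp q hq hdq) hqp

-- ---------- port A: grid representation ----------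
def pvBoxP (M N : Int) (p : Int × Int) : Prop := 0 ≤ p.1 ∧ p.1 < M ∧ 0 ≤ p.2 ∧ p.2 < N

def pvShape (M N : Int) (A : List (List Int)) : Prop :=
  A.length = M.toNat ∧ ∀ row ∈ A, row.length = N.toNat

def pvReprA (M N : Int) (A : List (List Int)) (L : Finset (Int × Int)) : Prop :=
  pvShape M N A ∧ (∀ p ∈ L, pvBoxP M N p) ∧
  ∀ i j : Int, 0 ≤ i → i < M → 0 ≤ j → j < N →
    pvGet2 A i j = (if ((i, j) ∈ L) then 1 else 0)

theorem pv_shape_set2 {M N : Int} {A : List (List Int)} (hsh : pvShape M N A)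
    {i j : Int} (hbox : pvBoxP M N (i, j)) (v : Int) : pvShape M N (pvSet2 A i j v) := by
  obtain ⟨hlen, hrow⟩ := hsh
  have hbox' : 0 ≤ i ∧ i < M ∧ 0 ≤ j ∧ j < N := hbox
  have hiN : i.toNat < A.length := by omega
  have hi' : ((i.toNat : Nat) : Int) = i := Int.toNat_of_nonneg hbox'.1
  unfold pvSet2
  rw [← hi', pv_pySetD_natCast _ _ _ hiN]
  constructor
  · rw [List.length_set]; exact hlen
  · intro row hr
    rcases List.mem_or_eq_of_mem_set hr with h' | h'
    · exact hrow row h'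
    · subst h'
      rw [pv_length_pySetD]
      refine hrow _ (PySem.List.pyGetD_mem _ _ ?_)
      simp only [PySem.Raise.InRange]
      omega

theorem pv_get2_set2 {M N : Int} {A : List (List Int)} (hsh : pvShape M N A)
    {i j : Int} (hbox : pvBoxP M N (i, j)) (v : Int) {i' j' : Int}
    (hbox' : pvBoxP M N (i', j')) :
    pvGet2 (pvSet2 A i j v) i' j' = if i' = i ∧ j' = j then v else pvGet2 A i' j' := by
  obtain ⟨hlen, hrow⟩ := hsh
  have hb : 0 ≤ i ∧ i < M ∧ 0 ≤ j ∧ j < N := hbox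
  have hb' : 0 ≤ i' ∧ i' < M ∧ 0 ≤ j' ∧ j' < N := hbox'
  have hiN : i.toNat < A.length := by omega
  have hrowmem : PySem.List.pyGetD A i [] ∈ A := by
    refine PySem.List.pyGetD_mem _ _ ?_
    simp only [PySem.Raise.InRange]
    omega
  have hrlen : (PySem.List.pyGetD A i []).length = N.toNat := hrow _ hrowmem
  have hjN : j.toNat < (PySem.List.pyGetD A i []).length := by omega
  have hi : ((i.toNat : Nat) : Int) = i := Int.toNat_of_nonneg hb.1
  have hj : ((j.toNat : Nat) : Int) = j := Int.toNat_of_nonneg hb.2.2.1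
  have hi' : ((i'.toNat : Nat) : Int) = i' := Int.toNat_of_nonneg hb'.1
  have hj' : ((j'.toNat : Nat) : Int) = j' := Int.toNat_of_nonneg hb'.2.2.1
  unfold pvSet2 pvGet2
  rw [← hi, ← hi', PySem.List.pyGetD_pySetD_natCast _ _ _ _ _ hiN]
  by_cases hii : i'.toNat = i.toNat
  · rw [if_pos hii]
    have hjN2 : j.toNat < (PySem.List.pyGetD A ((i.toNat : Nat) : Int) []).length := by
      rw [hi]; exact hjN
    rw [← hj, ← hj', PySem.List.pyGetD_pySetD_natCast _ _ _ _ _ hjN2]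
    by_cases hjj : j'.toNat = j.toNat
    · rw [if_pos hjj, if_pos (by omega)]
    · rw [if_neg hjj, if_neg (by omega), hii]
  · rw [if_neg hii, if_neg (by omega)]

theorem pv_repr_set2_zero {M N : Int} {A : List (List Int)} {L : Finset (Int × Int)}
    (hrepr : pvReprA M N A L) {p : Int × Int} (hbox : pvBoxP M N p) :
    pvReprA M N (pvSet2 A p.1 p.2 0) (L.erase p) := by
  obtain ⟨hsh, hLbox, hget⟩ := hrepr
  have hboxp : pvBoxP M N (p.1, p.2) := by rcases p with ⟨a, b⟩; exact hbox
  refine ⟨pv_shape_set2 hsh hboxp 0, fun q hq => hLbox q (Finset.mem_of_mem_erase hq), ?_⟩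
  intro i j hi hiM hj hjN
  rw [pv_get2_set2 hsh hboxp 0 (⟨hi, hiM, hj, hjN⟩ : pvBoxP M N (i, j))]
  rcases p with ⟨pi, pj⟩
  by_cases he : i = pi ∧ j = pj
  · obtain ⟨rfl, rfl⟩ := he
    simp
  · rw [if_neg he, hget i j hi hiM hj hjN]
    have : ((i, j) ∈ L.erase (pi, pj)) ↔ ((i, j) ∈ L) := by
      rw [Finset.mem_erase]
      constructor
      · exact fun h => h.2
      · intro h
        refine ⟨fun hc => he ?_, h⟩
        · rw [Prod.ext_iff] at hc
          exact ⟨hc.1, hc.2⟩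
    by_cases hm : (i, j) ∈ L <;> simp [this, hm]

theorem pv_repr_apply {M N : Int} : ∀ (ps : List (Int × Int)) (A : List (List Int))
    (L : Finset (Int × Int)), pvReprA M N A L → (∀ p ∈ ps, pvBoxP M N p) →
    pvReprA M N (ps.foldl (fun g p => pvSet2 g p.1 p.2 0) A) (L \ ps.toFinset) := by
  intro ps
  induction ps with
  | nil => intro A L h _; simpa using h
  | cons p ps ih =>
    intro A L h hbox
    rw [List.foldl_cons]
    have h1 := pv_repr_set2_zero h (hbox p (by simp))
    have h2 := ih _ _ h1 (fun q hq => hbox q (by simp [hq]))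
    have : L.erase p \ ps.toFinset = L \ (p :: ps).toFinset := by
      ext x
      simp [Finset.mem_sdiff, Finset.mem_erase, List.toFinset_cons]
      tauto
    rwa [this] at h2

-- ---------- port A: one round computes exactly the deficient cells ----------
def pvCnt (M N : Int) (A : List (List Int)) (i j : Int) : Int :=
  pvDirs.foldl (fun c d =>
    let x := i + d.1
    let y := j + d.2
    if ¬(x ≥ 0 ∧ x < M ∧ y ≥ 0 ∧ y < N) then c
    else if pvGet2 A x y = 1 then c + 1 else c) 0

theorem pv_nbrs_eq_map (i j : Int) :
    pvNbrs i j = pvDirs.map (fun d => (i + d.1, j + d.2)) := by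
  simp [pvNbrs, pvDirs]
  omega

theorem pv_cnt_eq_deg {M N : Int} {A : List (List Int)} {L : Finset (Int × Int)}
    (hrepr : pvReprA M N A L) {i j : Int} (hbox : pvBoxP M N (i, j)) :
    pvCnt M N A i j = (pvDeg L (i, j) : Int) := by
  obtain ⟨hsh, hLbox, hget⟩ := hrepr
  unfold pvCnt
  have h : ∀ (c : Int), ∀ d ∈ pvDirs,
      (let x := i + d.1
       let y := j + d.2
       if ¬(x ≥ 0 ∧ x < M ∧ y ≥ 0 ∧ y < N) then c
       else if pvGet2 A x y = 1 then c + 1 else c)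
      = (if ((i + d.1, j + d.2) ∈ L) then c + 1 else c) := by
    intro c d _
    show (if ¬(i + d.1 ≥ 0 ∧ i + d.1 < M ∧ j + d.2 ≥ 0 ∧ j + d.2 < N) then c
          else if pvGet2 A (i + d.1) (j + d.2) = 1 then c + 1 else c) = _
    by_cases hv : i + d.1 ≥ 0 ∧ i + d.1 < M ∧ j + d.2 ≥ 0 ∧ j + d.2 < N
    · rw [if_neg (by tauto)]
      rw [hget _ _ hv.1 hv.2.1 hv.2.2.1 hv.2.2.2]
      by_cases hm : ((i + d.1, j + d.2) ∈ L) <;> simp [hm]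
    · rw [if_pos hv]
      rw [if_neg (fun hm => hv ?_)]
      have := hLbox _ hm
      exact ⟨this.1, this.2.1, this.2.2.1, this.2.2.2⟩
  rw [PySem.List.foldl_congr_mem _ _ _ _ h]
  rw [PySem.List.foldl_ite_add_one (p := fun d : Int × Int => (i + d.1, j + d.2) ∈ L)]
  rw [pvDeg, pv_nbrs_eq_map, List.countP_map]
  simp only [zero_add, Int.natCast_inj]
  exact List.countP_congr (fun x _ => by simp)

theorem pv_round_eq (M N : Int) (A : List (List Int)) :
    pvRound M N A = (PySem.List.pyRange 0 M 1).flatMap (fun i =>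
      ((PySem.List.pyRange 0 N 1).filter
        (fun j => decide (¬ pvGet2 A i j = 0 ∧ pvCnt M N A i j < 4))).map (fun j => (i, j))) := by
  unfold pvRound
  have hinner : ∀ (i : Int) (acc : List (Int × Int)),
      (PySem.List.pyRange 0 N 1).foldl (fun acc j =>
        if pvGet2 A i j = 0 then acc
        else
          let cnt : Int := pvDirs.foldl (fun c d =>
            let x := i + d.1
            let y := j + d.2
            if ¬(x ≥ 0 ∧ x < M ∧ y ≥ 0 ∧ y < N) then c
            else if pvGet2 A x y = 1 then c + 1 else c) 0
          if cnt < 4 then acc ++ [(i, j)] else acc) acc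
      = acc ++ ((PySem.List.pyRange 0 N 1).filter
          (fun j => decide (¬ pvGet2 A i j = 0 ∧ pvCnt M N A i j < 4))).map (fun j => (i, j)) := by
    intro i acc
    have hcongr : ∀ (acc : List (Int × Int)), ∀ j ∈ PySem.List.pyRange 0 N 1,
        (if pvGet2 A i j = 0 then acc
         else
           let cnt : Int := pvDirs.foldl (fun c d =>
             let x := i + d.1
             let y := j + d.2
             if ¬(x ≥ 0 ∧ x < M ∧ y ≥ 0 ∧ y < N) then c
             else if pvGet2 A x y = 1 then c + 1 else c) 0
           if cnt < 4 then acc ++ [(i, j)] else acc)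
        = (if (¬ pvGet2 A i j = 0 ∧ pvCnt M N A i j < 4) then acc ++ [(i, j)] else acc) := by
      intro acc j _
      by_cases h0 : pvGet2 A i j = 0
      · simp [h0]
      · by_cases hc : pvCnt M N A i j < 4
        · simp only [if_neg h0]
          rw [if_pos (show (pvDirs.foldl _ 0 : Int) < 4 from hc), if_pos ⟨h0, hc⟩]
        · simp only [if_neg h0]
          rw [if_neg (show ¬ ((pvDirs.foldl _ 0 : Int) < 4) from hc), if_neg (by tauto)]
    rw [PySem.List.foldl_congr_mem _ _ _ _ hcongr]
    exact PySem.List.foldl_append_ite _ (fun j => (i, j)) _ acc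
  refine Eq.trans (PySem.List.foldl_congr_mem _ _
    (fun acc i => acc ++ ((PySem.List.pyRange 0 N 1).filter
        (fun j => decide (¬ pvGet2 A i j = 0 ∧ pvCnt M N A i j < 4))).map (fun j => (i, j))) _
    (fun acc i _ => hinner i acc)) ?_
  rw [PySem.List.foldl_append_eq_flatMap]
  simp

theorem pv_mem_round {M N : Int} {A : List (List Int)} {L : Finset (Int × Int)}
    (hrepr : pvReprA M N A L) {p : Int × Int} :
    p ∈ pvRound M N A ↔ (p ∈ L ∧ pvDeg L p < 4) := by
  obtain ⟨hsh, hLbox, hget⟩ := hrepr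
  rw [pv_round_eq]
  rw [List.mem_flatMap]
  constructor
  · rintro ⟨i, hi, hp⟩
    rw [List.mem_map] at hp
    obtain ⟨j, hj, rfl⟩ := hp
    rw [List.mem_filter] at hj
    obtain ⟨hjr, hcond⟩ := hj
    rw [PySem.List.mem_pyRange_one] at hi hjr
    simp only [decide_eq_true_eq] at hcond
    have hbox : pvBoxP M N (i, j) := ⟨hi.1, hi.2, hjr.1, hjr.2⟩
    have hmem : (i, j) ∈ L := by
      by_contra hm
      exact hcond.1 (by rw [hget i j hi.1 hi.2 hjr.1 hjr.2, if_neg hm])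
    refine ⟨hmem, ?_⟩
    have := pv_cnt_eq_deg ⟨hsh, hLbox, hget⟩ hbox
    rw [this] at hcond
    exact_mod_cast hcond.2
  · rintro ⟨hmem, hdeg⟩
    have hbox := hLbox p hmem
    rcases p with ⟨i, j⟩
    refine ⟨i, ?_, ?_⟩
    · rw [PySem.List.mem_pyRange_one]; exact ⟨hbox.1, hbox.2.1⟩
    · rw [List.mem_map]
      refine ⟨j, ?_, rfl⟩
      rw [List.mem_filter]
      refine ⟨by rw [PySem.List.mem_pyRange_one]; exact ⟨hbox.2.2.1, hbox.2.2.2⟩, ?_⟩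
      simp only [decide_eq_true_eq]
      constructor
      · rw [hget i j hbox.1 hbox.2.1 hbox.2.2.1 hbox.2.2.2, if_pos hmem]; omega
      · rw [pv_cnt_eq_deg ⟨hsh, hLbox, hget⟩ hbox]
        exact_mod_cast hdeg

theorem pv_round_nodup (M N : Int) (A : List (List Int)) : (pvRound M N A).Nodup := by
  rw [pv_round_eq]
  refine pv_nodup_flatMap _ _ ?_ ?_
  · intro i _
    refine List.Nodup.map ?_ (List.Nodup.filter _ (PySem.List.nodup_pyRange_one 0 N))
    intro a b hab
    simpa using congrArg Prod.snd hab
  · refine (PySem.List.nodup_pyRange_one 0 M).imp ?_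
    intro a b hab x hx y hy he
    rw [List.mem_map] at hx hy
    obtain ⟨xa, _, rfl⟩ := hx
    obtain ⟨ya, _, rfl⟩ := hy
    exact hab (by simpa using congrArg Prod.fst he)

-- ---------- port A: the while loop ----------
theorem pv_loopA_spec {M N : Int} : ∀ (fuel : Nat) (A : List (List Int))
    (L S : Finset (Int × Int)) (out : Int),
    pvReprA M N A L → L ⊆ S → pvCore S ⊆ L → L.card < fuel →
    pvLoopA fuel M N A out = out + ((L.card : Int) - ((pvCore S).card : Int)) := by
  intro fuel
  induction fuel with
  | zero => intro A L S out _ _ _ h; omega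
  | succ f ih =>
    intro A L S out hrepr hLS hcore hcard
    rw [pvLoopA]
    set upd := pvRound M N A with hupd
    by_cases hnil : upd = []
    · have hgood : pvGoodP L := by
        intro p hp
        by_contra h4
        have : p ∈ upd := (pv_mem_round hrepr).2 ⟨hp, by omega⟩
        rw [hnil] at this; simp at this
      rw [if_pos hnil, hnil, ← pv_core_eq hcore hLS hgood]
      simp
    · simp only [if_neg hnil]
      set R := L.filter (fun p => pvDeg L p < 4) with hR
      have hfr : upd.toFinset = R := by
        ext p
        rw [List.mem_toFinset, pv_mem_round hrepr, hR, Finset.mem_filter]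
      have hRL : R ⊆ L := Finset.filter_subset _ _
      have hRcard : upd.length = R.card := by
        rw [← hfr, List.toFinset_card_of_nodup (pv_round_nodup M N A)]
      have hRne : R.Nonempty := by
        rcases List.exists_mem_of_ne_nil upd hnil with ⟨p, hp⟩
        exact ⟨p, hfr ▸ List.mem_toFinset.2 hp⟩
      have hbox : ∀ p ∈ upd, pvBoxP M N p := by
        intro p hp
        exact hrepr.2.1 p ((pv_mem_round hrepr).1 hp).1
      have hrepr' : pvReprA M N (upd.foldl (fun g p => pvSet2 g p.1 p.2 0) A) (L \ R) := by
        have := pv_repr_apply upd A L hrepr hbox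
        rwa [hfr] at this
      have hRle : R.card ≤ L.card := Finset.card_le_card hRL
      have hsd : (L \ R).card = L.card - R.card := by
        rw [Finset.card_sdiff, Finset.inter_eq_left.2 hRL]
      have hcard' : (L \ R).card < f := by
        have h2 : 0 < R.card := Finset.card_pos.2 hRne
        omega
      have hcore' : pvCore S ⊆ L \ R := by
        refine pv_core_subset_sdiff hcore ?_
        intro p hp
        exact (Finset.mem_filter.1 hp).2
      rw [ih _ _ S _ hrepr' (fun x hx => hLS (Finset.mem_sdiff.1 hx).1) hcore' hcard']
      have h3 : (pvCore S).card ≤ (L \ R).card := Finset.card_le_card hcore'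
      rw [hRcard]
      push_cast
      omega

-- ---------- port A: the initial grid represents the cells ----------
theorem pv_initA_inner {M N : Int} (i0 : Int) (hbox0 : 0 ≤ i0 ∧ i0 < M) :
    ∀ (cs : List Char) (m : Nat) (G : List (List Int)), pvShape M N G →
    (m + cs.length ≤ N.toNat) →
    pvShape M N ((PySem.List.enumerate cs (m : Int)).foldl
        (fun A jc => pvSet2 A i0 jc.1 (if jc.2 = '@' then 1 else 0)) G) ∧
    ∀ i j : Int, 0 ≤ i → i < M → 0 ≤ j → j < N →
      pvGet2 ((PySem.List.enumerate cs (m : Int)).foldl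
          (fun A jc => pvSet2 A i0 jc.1 (if jc.2 = '@' then 1 else 0)) G) i j =
        if i = i0 ∧ m ≤ j.toNat ∧ j.toNat < m + cs.length
        then (if cs.getD (j.toNat - m) ' ' = '@' then 1 else 0)
        else pvGet2 G i j := by
  intro cs
  induction cs with
  | nil =>
    intro m G hsh _
    refine ⟨by simpa [PySem.List.enumerate_nil] using hsh, ?_⟩
    intro i j hi hiM hj hjN
    rw [if_neg (by simp only [List.length_nil]; omega)]
    simp [PySem.List.enumerate_nil]
  | cons c cs ih =>
    intro m G hsh hlen
    simp only [List.length_cons] at hlen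
    have hmN : (m : Int) < N := by omega
    have hboxm : pvBoxP M N (i0, (m : Int)) := ⟨hbox0.1, hbox0.2, by positivity, hmN⟩
    have hsh' : pvShape M N (pvSet2 G i0 (m : Int) (if c = '@' then 1 else 0)) :=
      pv_shape_set2 hsh hboxm _
    have hcast : ((m : Int) + 1) = (((m + 1 : Nat)) : Int) := by push_cast; ring
    have hstep : (PySem.List.enumerate (c :: cs) (m : Int)).foldl
        (fun A jc => pvSet2 A i0 jc.1 (if jc.2 = '@' then 1 else 0)) G
        = (PySem.List.enumerate cs ((m + 1 : Nat) : Int)).foldl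
            (fun A jc => pvSet2 A i0 jc.1 (if jc.2 = '@' then 1 else 0))
            (pvSet2 G i0 (m : Int) (if c = '@' then 1 else 0)) := by
      rw [PySem.List.enumerate_cons, List.foldl_cons, hcast]
    obtain ⟨ihsh, ihget⟩ := ih (m + 1) (pvSet2 G i0 (m : Int) (if c = '@' then 1 else 0)) hsh'
      (by omega)
    refine ⟨by rw [hstep]; exact ihsh, ?_⟩
    intro i j hi hiM hj hjN
    have hGS := pv_get2_set2 hsh hboxm (if c = '@' then (1 : Int) else 0)
      (⟨hi, hiM, hj, hjN⟩ : pvBoxP M N (i, j))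
    rw [hstep, ihget i j hi hiM hj hjN, hGS]
    by_cases hc1 : i = i0 ∧ m + 1 ≤ j.toNat ∧ j.toNat < (m + 1) + cs.length
    · rw [if_pos hc1]
      have hc3 : i = i0 ∧ m ≤ j.toNat ∧ j.toNat < m + (c :: cs).length := by
        simp only [List.length_cons]
        omega
      rw [if_pos hc3]
      have hj1 : j.toNat - m = (j.toNat - (m + 1)) + 1 := by omega
      rw [hj1, List.getD_cons_succ]
    · rw [if_neg hc1]
      by_cases heq : i = i0 ∧ j = (m : Int)
      · rw [if_pos heq]
        have hc3 : i = i0 ∧ m ≤ j.toNat ∧ j.toNat < m + (c :: cs).length := by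
          simp only [List.length_cons]
          have := heq.2
          refine ⟨heq.1, by omega, by omega⟩
        rw [if_pos hc3]
        have hj0 : j.toNat - m = 0 := by
          have := heq.2
          omega
        rw [hj0, List.getD_cons_zero]
      · rw [if_neg heq, if_neg ?_]
        intro hc3
        simp only [List.length_cons] at hc3
        obtain ⟨e1, e2, e3⟩ := hc3
        by_cases hjm : j = (m : Int)
        · exact heq ⟨e1, hjm⟩
        · exact hc1 ⟨e1, by omega, by omega⟩

theorem pv_initA_outer {M N : Int} :
    ∀ (ls : List String) (k : Nat) (G : List (List Int)), pvShape M N G →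
    (k + ls.length ≤ M.toNat) → (∀ l ∈ ls, l.toList.length ≤ N.toNat) →
    pvShape M N ((PySem.List.enumerate ls (k : Int)).foldl (fun A il =>
        (PySem.List.enumerate il.2.toList 0).foldl
          (fun A jc => pvSet2 A il.1 jc.1 (if jc.2 = '@' then 1 else 0)) A) G) ∧
    ∀ i j : Int, 0 ≤ i → i < M → 0 ≤ j → j < N →
      pvGet2 ((PySem.List.enumerate ls (k : Int)).foldl (fun A il =>
          (PySem.List.enumerate il.2.toList 0).foldl
            (fun A jc => pvSet2 A il.1 jc.1 (if jc.2 = '@' then 1 else 0)) A) G) i j =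
        if k ≤ i.toNat ∧ i.toNat < k + ls.length ∧ j.toNat < (ls.getD (i.toNat - k) "").toList.length
        then (if (ls.getD (i.toNat - k) "").toList.getD j.toNat ' ' = '@' then 1 else 0)
        else pvGet2 G i j := by
  intro ls
  induction ls with
  | nil =>
    intro k G hsh _ _
    refine ⟨by simpa [PySem.List.enumerate_nil] using hsh, ?_⟩
    intro i j hi hiM hj hjN
    rw [if_neg (by simp only [List.length_nil]; omega)]
    simp [PySem.List.enumerate_nil]
  | cons l ls ih =>
    intro k G hsh hlenM hlenN
    simp only [List.length_cons] at hlenM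
    have hkM : (k : Int) < M := by omega
    have hbox0 : 0 ≤ (k : Int) ∧ (k : Int) < M := ⟨by positivity, hkM⟩
    have hlN : l.toList.length ≤ N.toNat := hlenN l (by simp)
    have hz : ((0 : Nat) : Int) = (0 : Int) := rfl
    obtain ⟨insh, inget⟩ := pv_initA_inner (M := M) (N := N) (k : Int) hbox0 l.toList 0 G hsh
      (by omega)
    rw [hz] at insh inget
    have hcast : ((k : Int) + 1) = (((k + 1 : Nat)) : Int) := by push_cast; ring
    have hstep : (PySem.List.enumerate (l :: ls) (k : Int)).foldl (fun A il =>
        (PySem.List.enumerate il.2.toList 0).foldl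
          (fun A jc => pvSet2 A il.1 jc.1 (if jc.2 = '@' then 1 else 0)) A) G
        = (PySem.List.enumerate ls ((k + 1 : Nat) : Int)).foldl (fun A il =>
            (PySem.List.enumerate il.2.toList 0).foldl
              (fun A jc => pvSet2 A il.1 jc.1 (if jc.2 = '@' then 1 else 0)) A)
            ((PySem.List.enumerate l.toList (0 : Int)).foldl
              (fun A jc => pvSet2 A (k : Int) jc.1 (if jc.2 = '@' then 1 else 0)) G) := by
      rw [PySem.List.enumerate_cons, List.foldl_cons, hcast]
    obtain ⟨ihsh, ihget⟩ := ih (k + 1)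
      ((PySem.List.enumerate l.toList (0 : Int)).foldl
        (fun A jc => pvSet2 A (k : Int) jc.1 (if jc.2 = '@' then 1 else 0)) G)
      insh (by omega) (fun l' hl' => hlenN l' (by simp [hl']))
    refine ⟨by rw [hstep]; exact ihsh, ?_⟩
    intro i j hi hiM hj hjN
    rw [hstep, ihget i j hi hiM hj hjN]
    by_cases hcond : (k + 1) ≤ i.toNat ∧ i.toNat < (k + 1) + ls.length ∧
        j.toNat < (ls.getD (i.toNat - (k + 1)) "").toList.length
    · have hik : i.toNat - k = (i.toNat - (k + 1)) + 1 := by omega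
      rw [if_pos hcond]
      have hrhs : k ≤ i.toNat ∧ i.toNat < k + (l :: ls).length ∧
          j.toNat < ((l :: ls).getD (i.toNat - k) "").toList.length := by
        simp only [List.length_cons]
        rw [hik, List.getD_cons_succ]
        exact ⟨by omega, by omega, hcond.2.2⟩
      rw [if_pos hrhs, hik, List.getD_cons_succ]
    · rw [if_neg hcond]
      rw [inget i j hi hiM hj hjN]
      by_cases heq : i = (k : Int) ∧ 0 ≤ j.toNat ∧ j.toNat < 0 + l.toList.length
      · have hik0 : i.toNat - k = 0 := by
          have := heq.1
          omega
        rw [if_pos heq]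
        have hrhs : k ≤ i.toNat ∧ i.toNat < k + (l :: ls).length ∧
            j.toNat < ((l :: ls).getD (i.toNat - k) "").toList.length := by
          simp only [List.length_cons]
          rw [hik0, List.getD_cons_zero]
          have := heq.1
          refine ⟨by omega, by omega, by have := heq.2.2; omega⟩
        rw [if_pos hrhs, hik0, List.getD_cons_zero]
        have hsub0 : j.toNat - 0 = j.toNat := by omega
        rw [hsub0]
      · rw [if_neg heq, if_neg ?_]
        intro hcc
        simp only [List.length_cons] at hcc
        obtain ⟨e1, e2, e3⟩ := hcc
        by_cases hik : i = (k : Int)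
        · have hik0 : i.toNat - k = 0 := by omega
          rw [hik0, List.getD_cons_zero] at e3
          exact heq ⟨hik, by omega, by omega⟩
        · have hik1 : i.toNat - k = (i.toNat - (k + 1)) + 1 := by omega
          rw [hik1, List.getD_cons_succ] at e3
          exact hcond ⟨by omega, by omega, e3⟩

theorem pv_cells_box (lines : List String) (M N : Int)
    (hM : M = (lines.length : Int))
    (hlen : ∀ l ∈ lines, l.toList.length ≤ N.toNat) :
    ∀ p ∈ (pvCells lines).toFinset, pvBoxP M N p := by
  intro p hp
  rw [List.mem_toFinset, pv_mem_cells] at hp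
  obtain ⟨k, hk, m, hm, rfl, _⟩ := hp
  have := hlen lines[k] (List.getElem_mem hk)
  refine ⟨by positivity, ?_, by positivity, ?_⟩
  · omega
  · have : m < N.toNat := by omega
    omega

theorem pv_initA_repr (lines : List String) (M N : Int)
    (hM : M = (lines.length : Int)) (hN : 0 ≤ N)
    (hlen : ∀ l ∈ lines, l.toList.length ≤ N.toNat) :
    pvReprA M N (pvInitA lines M N) (pvCells lines).toFinset := by
  have hsh0 : pvShape M N ((PySem.List.pyRange 0 M 1).map
      fun _ => (PySem.List.pyRange 0 N 1).map fun _ => (0 : Int)) := by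
    constructor
    · simp [PySem.List.length_pyRange_one]
    · intro row hr
      rw [List.mem_map] at hr
      obtain ⟨_, _, rfl⟩ := hr
      simp [PySem.List.length_pyRange_one]
  have hget0 : ∀ i j : Int, 0 ≤ i → i < M → 0 ≤ j → j < N →
      pvGet2 ((PySem.List.pyRange 0 M 1).map
        fun _ => (PySem.List.pyRange 0 N 1).map fun _ => (0 : Int)) i j = 0 := by
    intro i j hi hiM hj hjN
    unfold pvGet2
    rw [PySem.List.pyGetD_map_pyRange_of_nonneg _ M i [] hi hiM]
    rw [PySem.List.pyGetD_map_pyRange_of_nonneg _ N j 0 hj hjN]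
  obtain ⟨fsh, fget⟩ := pv_initA_outer (M := M) (N := N) lines 0
    ((PySem.List.pyRange 0 M 1).map fun _ => (PySem.List.pyRange 0 N 1).map fun _ => (0 : Int))
    hsh0 (by omega) hlen
  have hz : ((0 : Nat) : Int) = (0 : Int) := rfl
  rw [hz] at fsh fget
  have hstart : pvInitA lines M N = (PySem.List.enumerate lines (0 : Int)).foldl
      (fun A il => (PySem.List.enumerate il.2.toList 0).foldl
        (fun A jc => pvSet2 A il.1 jc.1 (if jc.2 = '@' then 1 else 0)) A)
      ((PySem.List.pyRange 0 M 1).map fun _ => (PySem.List.pyRange 0 N 1).map fun _ => (0 : Int)) := rfl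
  refine ⟨by rw [hstart]; exact fsh, ?_, ?_⟩
  · exact pv_cells_box lines M N hM hlen
  · intro i j hi hiM hj hjN
    rw [hstart, fget i j hi hiM hj hjN, hget0 i j hi hiM hj hjN]
    have hmem : ((i, j) ∈ (pvCells lines).toFinset) ↔
        (i.toNat < lines.length ∧ j.toNat < (lines.getD i.toNat "").toList.length ∧
          (lines.getD i.toNat "").toList.getD j.toNat ' ' = '@') := by
      rw [List.mem_toFinset, pv_mem_cells]
      constructor
      · rintro ⟨k, hk, m, hm, hpq, hc⟩
        rw [Prod.mk.injEq] at hpq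
        have hik : i.toNat = k := by omega
        have hjm : j.toNat = m := by omega
        have hgd : lines.getD i.toNat "" = lines[k] := by
          rw [hik]
          simp [List.getElem?_eq_getElem hk]
        refine ⟨by omega, ?_, ?_⟩
        · rw [hgd, hjm]; exact hm
        · rw [hgd, hjm, List.getD_eq_getElem _ ' ' hm]
          exact hc
      · rintro ⟨h1, h2, h3⟩
        have hgd : lines.getD i.toNat "" = lines[i.toNat] := by simp [h1]
        rw [hgd] at h2 h3
        refine ⟨i.toNat, h1, j.toNat, h2, ?_, ?_⟩
        · rw [Prod.mk.injEq]
          constructor <;> omega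
        · rw [← List.getD_eq_getElem _ ' ' h2]
          exact h3
    have hsub0 : i.toNat - 0 = i.toNat := by omega
    by_cases hc : (i, j) ∈ (pvCells lines).toFinset
    · rw [if_pos hc]
      obtain ⟨c1, c2, c3⟩ := hmem.1 hc
      rw [if_pos (by rw [hsub0]; exact ⟨by omega, by omega, c2⟩), hsub0, if_pos c3]
    · rw [if_neg hc]
      by_cases hcc : 0 ≤ i.toNat ∧ i.toNat < 0 + lines.length ∧
          j.toNat < (lines.getD (i.toNat - 0) "").toList.length
      · rw [if_pos hcc, hsub0]
        rw [if_neg ?_]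
        intro hat
        rw [hsub0] at hcc
        exact hc (hmem.2 ⟨by omega, hcc.2.2, hat⟩)
      · rw [if_neg hcc]

-- ---------- assembly ----------
theorem pv_cells_card_le (lines : List String) (M N : Int)
    (hM : M = (lines.length : Int)) (hN : 0 ≤ N)
    (hlen : ∀ l ∈ lines, l.toList.length ≤ N.toNat) :
    (pvCells lines).toFinset.card ≤ (M * N).toNat := by
  have hbox := pv_cells_box lines M N hM hlen
  have hsub : (pvCells lines).toFinset ⊆ (Finset.Ico (0:Int) M) ×ˢ (Finset.Ico (0:Int) N) := by
    intro p hp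
    have := hbox p hp
    rw [Finset.mem_product, Finset.mem_Ico, Finset.mem_Ico]
    exact ⟨⟨this.1, this.2.1⟩, ⟨this.2.2.1, this.2.2.2⟩⟩
  have := Finset.card_le_card hsub
  rw [Finset.card_product, Int.card_Ico, Int.card_Ico] at this
  have hM0 : 0 ≤ M := by omega
  obtain ⟨m, rfl⟩ := Int.eq_ofNat_of_zero_le hM0
  obtain ⟨n, rfl⟩ := Int.eq_ofNat_of_zero_le hN
  simpa using this


theorem pv_main (lines : List String) (hne : lines ≠ [])
    (hle : ∀ l ∈ lines, PySem.Str.len l ≤ PySem.Str.len (lines.headD "")) :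
    pvLoopA (((lines.length : Int) * PySem.Str.len (PySem.List.pyGetD lines 0 "")).toNat + 1)
      (lines.length : Int) (PySem.Str.len (PySem.List.pyGetD lines 0 ""))
      (pvInitA lines (lines.length : Int) (PySem.Str.len (PySem.List.pyGetD lines 0 ""))) 0
    = ((pvInitB lines).2.length : Int) -
        PySem.Set.len (pvLoopB ((pvInitB lines).2.length + 8 * (pvInitB lines).1.length + 1)
          (pvInitB lines).1 (pvInitB lines).2) := by
  have hget0 : PySem.List.pyGetD lines 0 "" = lines.headD "" := by
    rw [PySem.List.pyGetD_zero]
    cases lines with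
    | nil => cases hne rfl
    | cons a t => simp
  have hN : PySem.Str.len (PySem.List.pyGetD lines 0 "")
      = (((lines.headD "").toList.length : Nat) : Int) := by
    rw [hget0, PySem.Str.len_eq]
  rw [hN]
  have hN0 : (0 : Int) ≤ (((lines.headD "").toList.length : Nat) : Int) := by positivity
  have hlen' : ∀ l ∈ lines, l.toList.length ≤ ((((lines.headD "").toList.length : Nat) : Int)).toNat := by
    intro l hl
    have h := hle l hl
    rw [PySem.Str.len_eq, PySem.Str.len_eq] at h
    simp only [Int.toNat_natCast]
    exact_mod_cast h
  have hrepr := pv_initA_repr lines (lines.length : Int) (((lines.headD "").toList.length : Nat) : Int)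
    rfl hN0 hlen'
  have hcard := pv_cells_card_le lines (lines.length : Int) (((lines.headD "").toList.length : Nat) : Int)
    rfl hN0 hlen'
  have hAeq := pv_loopA_spec (M := (lines.length : Int)) (N := (((lines.headD "").toList.length : Nat) : Int))
    ((((lines.length : Int) * (((lines.headD "").toList.length : Nat) : Int)).toNat + 1))
    (pvInitA lines (lines.length : Int) (((lines.headD "").toList.length : Nat) : Int))
    (pvCells lines).toFinset (pvCells lines).toFinset 0 hrepr subset_rfl
    (pvCore_subset _) (by omega)
  rw [hAeq]
  rw [pv_initB_eq lines]
  have hBeq := pvLoopB_spec (pvCells lines).toFinset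
    ((pvCells lines).length + 8 * (pvCells lines).length + 1)
    (pvCells lines) (pvCells lines) (pv_cells_nodup lines) subset_rfl (pvCore_subset _)
    (fun q hq _ => hq) (by omega)
  have hlen0 : PySem.Set.len (pvLoopB ((pvCells lines, pvCells lines).2.length +
      8 * (pvCells lines, pvCells lines).1.length + 1)
      (pvCells lines, pvCells lines).1 (pvCells lines, pvCells lines).2)
      = ((pvCore (pvCells lines).toFinset).card : Int) := by
    show ((pvLoopB ((pvCells lines).length + 8 * (pvCells lines).length + 1)
      (pvCells lines) (pvCells lines)).length : Int) = _
    rw [hBeq]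
  rw [hlen0]
  have hc : (pvCells lines).toFinset.card = (pvCells lines).length :=
    List.toFinset_card_of_nodup (pv_cells_nodup lines)
  rw [hc]
  push_cast
  ring

-- ===== VERDICT (by name: the statement is the Claim_ definition above) =====
theorem part2_spec : Claim_equal_part2 := by
  unfold Claim_equal_part2
  intro data _ hpre
  obtain ⟨hne, hle⟩ := hpre
  unfold Spec_part2
  exact pv_main (PySem.Str.splitlines data) hne hle
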